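-- pv_equiv track=rewrite | github.com/ziyyan96/Interview_BioAI4LCSM | LLM_analysis.py | extract_support_sentence
-- ===== SOURCE A (Python) =====
-- def extract_support_sentence(abstract, gene):
--     if abstract == "NA":
--         return "NA"
--     gene_lower = gene.lower()
--     sentences = abstract.split(". ")
--
--     strong_keywords = [
--         "upregulated", "downregulated", "associated", "correlated", "activates",
--         "represses", "marker", "expressed", "expression", "prognosis", "tumor"
--     ]
--
--     # Search for a sentence that contains the gene and a strong keyword
--     for sent in sentences:
--         s = sent.lower()
--         if gene_lower in s and any(k in s for k in strong_keywords):
--             return sent.strip()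
--
--     # Fallback: return the first sentence that mentions the gene
--     for sent in sentences:
--         if gene_lower in sent.lower():
--             return sent.strip()
--
--     return "NA"
-- ===== SOURCE B (Python) =====
-- STRONG_KEYWORDS = [
--     "upregulated", "downregulated", "associated", "correlated", "activates",
--     "represses", "marker", "expressed", "expression", "prognosis", "tumor"
-- ]
--
-- def extract_support_sentence(abstract, gene):
--     # Single pass: return first strong match immediately; remember the first
--     # gene-only sentence as a fallback committed only after the whole scan.
--     if abstract == "NA":
--         return "NA"
--     gl = gene.lower()
--     fallback = None
--     for sent in abstract.split(". "):
--         s = sent.lower()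
--         if gl in s and any(k in s for k in STRONG_KEYWORDS):
--             return sent.strip()
--         if fallback is None and gl in s:
--             fallback = sent
--     return fallback.strip() if fallback is not None else "NA"
-- ===== Notes on version B (the rewrite author's own statement) =====
-- stated objective: simpler
-- what changed: Replaces A's two sequential scans of the sentence list (strong-keyword pass, then gene-only pass) by one scan that returns a strong match immediately and commits a remembered first gene-only sentence only after the loop.
import Mathlib
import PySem

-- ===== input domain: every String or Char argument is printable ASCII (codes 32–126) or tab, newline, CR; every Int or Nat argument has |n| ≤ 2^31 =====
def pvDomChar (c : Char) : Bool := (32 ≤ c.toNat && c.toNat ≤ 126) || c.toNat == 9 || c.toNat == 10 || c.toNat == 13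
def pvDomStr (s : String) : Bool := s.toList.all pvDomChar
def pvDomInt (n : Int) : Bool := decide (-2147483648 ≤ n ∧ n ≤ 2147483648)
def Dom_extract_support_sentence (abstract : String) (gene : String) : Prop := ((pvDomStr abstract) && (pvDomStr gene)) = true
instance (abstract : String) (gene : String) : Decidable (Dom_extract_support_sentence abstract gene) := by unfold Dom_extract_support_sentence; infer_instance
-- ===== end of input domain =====

-- B merges A's two sequential scans into one pass with a fallback committed after the loop (objective: simpler).

-- shared constant: the strong-keyword list (identical in both sources)
def pvStrongKeywords : List String :=
  ["upregulated", "downregulated", "associated", "correlated", "activates",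
   "represses", "marker", "expressed", "expression", "prognosis", "tumor"]

def pvAnyKw (s : String) : Bool := pvStrongKeywords.any (fun k => PySem.Str.isIn k s)

-- ===== PORT A =====
-- first loop of A: first sentence containing the gene and a strong keyword
def pvFindStrong (gl : String) : List String → Option String
  | [] => none
  | sent :: rest =>
    let s := PySem.Str.lower sent
    if PySem.Str.isIn gl s && pvAnyKw s then some sent else pvFindStrong gl rest

-- second loop of A: first sentence containing the gene
def pvFindGene (gl : String) : List String → Option String
  | [] => none
  | sent :: rest =>
    if PySem.Str.isIn gl (PySem.Str.lower sent) then some sent else pvFindGene gl rest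

def extract_support_sentence (abstract : String) (gene : String) : String :=
  if abstract == "NA" then "NA"
  else
    let gl := PySem.Str.lower gene
    let sentences := (PySem.Str.split? abstract ". ").getD []
    match pvFindStrong gl sentences with
    | some sent => PySem.Str.strip sent
    | none =>
      match pvFindGene gl sentences with
      | some sent => PySem.Str.strip sent
      | none => "NA"

-- ===== PORT B =====
-- B's single-pass loop with a fallback carried through the scan
def pvScan (gl : String) (fb : Option String) : List String → String
  | [] => match fb with
          | some f => PySem.Str.strip f
          | none => "NA"
  | sent :: rest =>
    let s := PySem.Str.lower sent
    if PySem.Str.isIn gl s && pvAnyKw s then PySem.Str.strip sent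
    else pvScan gl (if fb.isNone && PySem.Str.isIn gl s then some sent else fb) rest

def extract_support_sentence_alt (abstract : String) (gene : String) : String :=
  if abstract == "NA" then "NA"
  else pvScan (PySem.Str.lower gene) none ((PySem.Str.split? abstract ". ").getD [])

-- ===== PRECONDITION & SPEC =====
def Spec_extract_support_sentence (abstract : String) (gene : String) (out : String) : Prop := out = extract_support_sentence_alt abstract gene
instance (abstract : String) (gene : String) (out : String) : Decidable (Spec_extract_support_sentence abstract gene out) := by unfold Spec_extract_support_sentence; infer_instance

-- ===== CLAIM (what is proved, stated in full; the proofs are below) =====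
def Claim_equal_extract_support_sentence : Prop := ∀ (abstract : String) (gene : String), Dom_extract_support_sentence abstract gene → Spec_extract_support_sentence abstract gene (extract_support_sentence abstract gene)

-- ===== LEMMAS AND PROOFS =====
-- B's loop equals A's two-pass structure, for any carried fallback
lemma pvScan_eq (gl : String) (l : List String) : ∀ fb : Option String,
    pvScan gl fb l =
      match pvFindStrong gl l with
      | some sent => PySem.Str.strip sent
      | none =>
        match fb with
        | some f => PySem.Str.strip f
        | none =>
          match pvFindGene gl l with
          | some sent => PySem.Str.strip sent
          | none => "NA" := by
  induction l with
  | nil => intro fb; cases fb <;> rfl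
  | cons sent rest ih =>
    intro fb
    cases hs : (PySem.Str.isIn gl (PySem.Str.lower sent) && pvAnyKw (PySem.Str.lower sent)) with
    | true => simp only [pvScan, pvFindStrong, hs, if_true]
    | false =>
      cases fb with
      | some f =>
        simp only [pvScan, pvFindStrong, hs, Option.isNone_some, Bool.false_and, ih]
        simp
      | none =>
        cases hg : PySem.Str.isIn gl (PySem.Str.lower sent) with
        | true =>
          have hk : pvAnyKw (PySem.Str.lower sent) = false := by
            cases hk' : pvAnyKw (PySem.Str.lower sent) with
            | false => rfl
            | true => rw [hg, hk'] at hs; simp at hs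
          simp only [pvScan, pvFindStrong, pvFindGene, hg, hk, Option.isNone_none,
            Bool.true_and, ih]
          cases pvFindStrong gl rest <;> simp
        | false =>
          simp only [pvScan, pvFindStrong, pvFindGene, hg, Option.isNone_none,
            Bool.true_and, ih]
          simp

-- ===== VERDICT (by name: the statement is the Claim_ definition above) =====
theorem extract_support_sentence_spec : Claim_equal_extract_support_sentence := by
  intro abstract gene _
  unfold Spec_extract_support_sentence extract_support_sentence extract_support_sentence_alt
  by_cases hna : (abstract == "NA") = true
  · simp [hna]
  · simp only [hna, if_neg, Bool.not_eq_true]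
    rw [pvScan_eq]
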